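-- pv_equiv track=rewrite | github.com/vikpattabi/sarcasm | architecture/test.py | bleu_stats
-- ===== SOURCE A (Python) =====
-- from collections import Counter
--
-- def bleu_stats(hypothesis, reference):
--     """Compute statistics for BLEU."""
--     stats = []
--     stats.append(len(hypothesis))
--     stats.append(len(reference))
--     for n in range(1, 2):
--         s_ngrams = Counter(
--             [tuple(hypothesis[i:i + n]) for i in range(len(hypothesis) + 1 - n)]
--         )
--         r_ngrams = Counter(
--             [tuple(reference[i:i + n]) for i in range(len(reference) + 1 - n)]
--         )
--         stats.append(max([sum((s_ngrams & r_ngrams).values()), 0]))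
--         stats.append(max([len(hypothesis) + 1 - n, 0]))
--     return stats
-- ===== SOURCE B (Python) =====
-- def bleu_stats(hypothesis, reference):
--     """Compute statistics for BLEU."""
--     hs = sorted(hypothesis)
--     rs = sorted(reference)
--     i = j = match = 0
--     while i < len(hs) and j < len(rs):
--         if hs[i] == rs[j]:
--             match += 1
--             i += 1
--             j += 1
--         elif hs[i] < rs[j]:
--             i += 1
--         else:
--             j += 1
--     return [len(hypothesis), len(reference), match, len(hypothesis)]
-- ===== Notes on version B (the rewrite author's own statement) =====
-- stated objective: alternative
-- what changed: Replaced A's two Counter constructions and Counter-intersection (with the unrolled n-loop, tuple slicing and max wrappers) by sorting both sentences and counting common words with a two-pointer merge scan; no word-count table is built at all.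
import Mathlib
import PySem

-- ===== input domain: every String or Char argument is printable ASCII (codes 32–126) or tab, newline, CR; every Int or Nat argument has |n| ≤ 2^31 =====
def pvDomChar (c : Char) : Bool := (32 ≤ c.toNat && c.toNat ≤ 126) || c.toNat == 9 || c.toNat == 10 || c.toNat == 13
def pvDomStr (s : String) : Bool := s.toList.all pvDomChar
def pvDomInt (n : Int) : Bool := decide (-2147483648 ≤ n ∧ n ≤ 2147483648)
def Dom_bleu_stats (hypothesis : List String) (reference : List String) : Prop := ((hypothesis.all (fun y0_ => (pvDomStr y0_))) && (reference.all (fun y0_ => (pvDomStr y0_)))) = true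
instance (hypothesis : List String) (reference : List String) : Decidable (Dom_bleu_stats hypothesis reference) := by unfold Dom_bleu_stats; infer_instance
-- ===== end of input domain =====

-- B sorts both sentences and counts matching words with a two-pointer merge scan,
-- instead of A's two Counters plus Counter-intersection (objective: alternative).

-- ===== PORT A =====
-- Counter & Counter (Python's Counter.__and__): keep the positive minima, keys in d1's order.
def pvCounterAnd {κ : Type} [BEq κ] (d1 d2 : PySem.Dict κ Int) : PySem.Dict κ Int :=
  d1.items.foldl (fun res p =>
    if 0 < min p.2 (d2.getD p.1 0) then res.insert p.1 (min p.2 (d2.getD p.1 0)) else res)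
    PySem.Dict.empty

def bleu_stats (hypothesis : List String) (reference : List String) : List Int :=
  let stats : List Int := []
  let stats := stats ++ [(hypothesis.length : Int)]
  let stats := stats ++ [(reference.length : Int)]
  (PySem.List.pyRange 1 2).foldl (fun stats n =>
    let s_ngrams := PySem.Dict.counter
      ((PySem.List.pyRange 0 ((hypothesis.length : Int) + 1 - n)).map
        (fun i => PySem.List.slice hypothesis (some i) (some (i + n))))
    let r_ngrams := PySem.Dict.counter
      ((PySem.List.pyRange 0 ((reference.length : Int) + 1 - n)).map
        (fun i => PySem.List.slice reference (some i) (some (i + n))))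
    let stats := stats ++ [max ((pvCounterAnd s_ngrams r_ngrams).values.sum) 0]
    stats ++ [max ((hypothesis.length : Int) + 1 - n) 0]) stats

-- ===== PORT B =====
-- B's while loop over indices i, j as structural recursion on the two sorted suffixes.
def pvMergeCount : List String → List String → Int
  | [], _ => 0
  | _ :: _, [] => 0
  | a :: as, b :: bs =>
    if a = b then 1 + pvMergeCount as bs
    else if a < b then pvMergeCount as (b :: bs)
    else pvMergeCount (a :: as) bs
termination_by xs ys => xs.length + ys.length

def bleu_stats_alt (hypothesis : List String) (reference : List String) : List Int :=
  let hs := PySem.List.sorted hypothesis (fun x => x) false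
  let rs := PySem.List.sorted reference (fun x => x) false
  [(hypothesis.length : Int), (reference.length : Int), pvMergeCount hs rs,
   (hypothesis.length : Int)]

-- ===== PRECONDITION & SPEC =====
def Spec_bleu_stats (hypothesis : List String) (reference : List String) (out : List Int) : Prop := out = bleu_stats_alt hypothesis reference
instance (hypothesis : List String) (reference : List String) (out : List Int) : Decidable (Spec_bleu_stats hypothesis reference out) := by unfold Spec_bleu_stats; infer_instance

-- ===== CLAIM (what is proved, stated in full; the proofs are below) =====
def Claim_equal_bleu_stats : Prop := ∀ (hypothesis : List String) (reference : List String), Dom_bleu_stats hypothesis reference → Spec_bleu_stats hypothesis reference (bleu_stats hypothesis reference)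

-- ===== LEMMAS AND PROOFS =====

-- f injective ⇒ ordered dedup commutes with map (aux over the accumulator)
lemma pvOfListMapAux {α β : Type} [BEq α] [LawfulBEq α] [BEq β] [LawfulBEq β]
    (f : α → β) (hf : Function.Injective f) :
    ∀ (l : List α) (s : List α),
      (l.map f).foldl PySem.Set.add (s.map f) = (l.foldl PySem.Set.add s).map f := by
  intro l
  induction l with
  | nil => intro s; rfl
  | cons x t ih =>
    intro s
    have hadd : PySem.Set.add (s.map f) (f x) = (PySem.Set.add s x).map f := by
      by_cases h : x ∈ s <;>
        simp [PySem.Set.add, hf.eq_iff, h]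
    simpa [hadd] using ih (PySem.Set.add s x)

lemma pvOfListMap {α β : Type} [BEq α] [LawfulBEq α] [BEq β] [LawfulBEq β]
    (f : α → β) (hf : Function.Injective f) (l : List α) :
    PySem.Set.ofList (l.map f) = (PySem.Set.ofList l).map f := by
  simpa using pvOfListMapAux f hf l []

-- the 1-gram list A builds is just the singleton image of the sentence
lemma pvGramsEq (h : List String) :
    (List.range h.length).map (fun k => (h.drop k).take 1) = h.map (fun w => [w]) := by
  induction h with
  | nil => rfl
  | cons w t ih =>
    simp only [List.length_cons, List.range_succ_eq_map, List.map_cons, List.map_map]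
    exact congrArg _ (by simpa [Function.comp] using ih)

-- the value sum of pvCounterAnd's fold, over an item list with fresh distinct keys
lemma pvAndSum {κ : Type} [BEq κ] [LawfulBEq κ] (d2 : PySem.Dict κ Int) :
    ∀ (l : List (κ × Int)) (res : PySem.Dict κ Int),
      (l.map (·.1)).Nodup → (∀ p ∈ l, res.contains p.1 = false) →
      ((l.foldl (fun res p =>
          if 0 < min p.2 (d2.getD p.1 0) then res.insert p.1 (min p.2 (d2.getD p.1 0)) else res)
        res).values).sum
      = res.values.sum
        + (l.map (fun p => if 0 < min p.2 (d2.getD p.1 0) then min p.2 (d2.getD p.1 0) else 0)).sum := by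
  intro l
  induction l with
  | nil => intro res _ _; simp
  | cons p t ih =>
    intro res hnd hfresh
    have hp : res.contains p.1 = false := hfresh p (by simp)
    rw [List.map_cons] at hnd
    have hhead : p.1 ∉ t.map (·.1) := (List.nodup_cons.mp hnd).1
    have hndt : (t.map (·.1)).Nodup := (List.nodup_cons.mp hnd).2
    by_cases hm : 0 < min p.2 (d2.getD p.1 0)
    · have hfresh' : ∀ q ∈ t, (res.insert p.1 (min p.2 (d2.getD p.1 0))).contains q.1 = false := by
        intro q hq
        have hne : q.1 ≠ p.1 := fun he => hhead (he ▸ List.mem_map_of_mem hq)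
        rw [PySem.Dict.contains_insert]
        simp [hne, hfresh q (List.mem_cons_of_mem _ hq)]
      have hins : (res.insert p.1 (min p.2 (d2.getD p.1 0))).values
          = res.values ++ [min p.2 (d2.getD p.1 0)] := by
        show ((res.insert p.1 _).items.map (·.2)) = (res.items.map (·.2)) ++ _
        rw [PySem.Dict.items_insert]
        simp [hp]
      simp only [List.foldl_cons, if_pos hm]
      rw [ih _ hndt hfresh', hins]
      simp only [List.sum_append, List.map_cons, List.sum_cons]
      rw [if_pos hm]
      simp only [List.sum_nil, add_zero]
      ring
    · simp only [List.foldl_cons, if_neg hm]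
      rw [ih _ hndt (fun q hq => hfresh q (List.mem_cons_of_mem _ hq))]
      rw [List.map_cons, List.sum_cons, if_neg hm, zero_add]

-- Nat bridge: the sum of per-word minima is the size of the multiset intersection
lemma pvSumMinCard (h r : List String) :
    (∑ w ∈ h.toFinset, min (h.count w) (r.count w)) = ((↑h : Multiset String) ∩ ↑r).card := by
  classical
  have hsub : ((↑h : Multiset String) ∩ ↑r).toFinset ⊆ h.toFinset := by
    intro a ha
    simp only [Multiset.mem_toFinset] at ha
    have := Multiset.mem_of_le (Multiset.inter_le_left (s := (↑h : Multiset String)) (t := ↑r)) ha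
    simpa [List.mem_toFinset] using this
  calc (∑ w ∈ h.toFinset, min (h.count w) (r.count w))
      = ∑ w ∈ h.toFinset, Multiset.count w ((↑h : Multiset String) ∩ ↑r) := by
        refine Finset.sum_congr rfl (fun w _ => ?_)
        rw [Multiset.count_inter, Multiset.coe_count, Multiset.coe_count]
    _ = ∑ w ∈ ((↑h : Multiset String) ∩ ↑r).toFinset, Multiset.count w ((↑h : Multiset String) ∩ ↑r) := by
        refine (Finset.sum_subset hsub ?_).symm
        intro w _ hw
        rw [Multiset.count_eq_zero]
        exact fun hmem => hw (Multiset.mem_toFinset.mpr hmem)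
    _ = ((↑h : Multiset String) ∩ ↑r).card := Multiset.toFinset_sum_count_eq _

-- B's merge scan on two ≤-sorted lists counts the multiset intersection
lemma pvMergeCountInter : ∀ (xs ys : List String),
    xs.Pairwise (· ≤ ·) → ys.Pairwise (· ≤ ·) →
    pvMergeCount xs ys = (((↑xs : Multiset String) ∩ ↑ys).card : Int) := by
  intro xs ys
  induction xs, ys using pvMergeCount.induct with
  | case1 ys => intro _ _; simp [pvMergeCount, Multiset.zero_inter]
  | case2 a as => intro _ _; simp [pvMergeCount, Multiset.inter_zero]
  | case3 as b bs ih =>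
    intro hxs hys
    have hint : ((↑(b :: as) : Multiset String) ∩ ↑(b :: bs))
        = b ::ₘ ((↑as : Multiset String) ∩ ↑bs) := by
      rw [← Multiset.cons_coe, ← Multiset.cons_coe,
          Multiset.cons_inter_of_pos _ (by simp : b ∈ b ::ₘ (↑bs : Multiset String)),
          Multiset.erase_cons_head]
    rw [pvMergeCount, if_pos rfl, ih hxs.tail hys.tail, hint, Multiset.card_cons]
    push_cast; ring
  | case4 a as b bs hne hlt ih =>
    intro hxs hys
    have hnotmem : a ∉ (↑(b :: bs) : Multiset String) := by
      rw [Multiset.mem_coe, List.mem_cons]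
      rintro (rfl | hmem)
      · exact hne rfl
      · have hble := List.rel_of_pairwise_cons hys hmem
        exact absurd (lt_of_lt_of_le hlt hble) (lt_irrefl a)
    have hint : ((↑(a :: as) : Multiset String) ∩ ↑(b :: bs))
        = ((↑as : Multiset String) ∩ ↑(b :: bs)) := by
      rw [← Multiset.cons_coe a, Multiset.cons_inter_of_neg _ hnotmem]
    rw [pvMergeCount, if_neg hne, if_pos hlt, ih hxs.tail hys, hint]
  | case5 a as b bs hne hnlt ih =>
    intro hxs hys
    have hbgt : b < a := by
      rcases lt_trichotomy a b with h | h | h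
      · exact absurd h hnlt
      · exact absurd h hne
      · exact h
    have hnotmem : b ∉ (↑(a :: as) : Multiset String) := by
      rw [Multiset.mem_coe, List.mem_cons]
      rintro (rfl | hmem)
      · exact lt_irrefl b hbgt
      · have hale := List.rel_of_pairwise_cons hxs hmem
        exact absurd (lt_of_lt_of_le hbgt hale) (lt_irrefl b)
    have hint : ((↑(a :: as) : Multiset String) ∩ ↑(b :: bs))
        = ((↑(a :: as) : Multiset String) ∩ ↑bs) := by
      rw [Multiset.inter_comm, ← Multiset.cons_coe b, Multiset.cons_inter_of_neg _ hnotmem,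
          Multiset.inter_comm]
    rw [pvMergeCount, if_neg hne, if_neg hnlt, ih hxs hys.tail, hint]

-- A's third statistic, reduced to the per-word minima sum
lemma pvASum (h r : List String) :
    (pvCounterAnd (PySem.Dict.counter (h.map (fun w => [w])))
        (PySem.Dict.counter (r.map (fun w => [w])))).values.sum
      = ∑ w ∈ h.toFinset, ((min (h.count w) (r.count w) : Nat) : Int) := by
  classical
  have hinj : Function.Injective (fun w : String => [w]) := by
    intro a b hab; simpa using hab
  have hnd : ((PySem.Dict.counter (h.map (fun w => [w]))).items.map (·.1)).Nodup := by
    rw [PySem.Dict.items_counter, List.map_map]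
    have hid : ((fun x : List String × Int => x.1) ∘
        fun k : List String => (k, (List.count k (h.map (fun w => [w])) : Int))) = id := rfl
    rw [hid, List.map_id]
    exact PySem.Set.nodup_ofList (h.map (fun w => [w]))
  have hsum := pvAndSum (PySem.Dict.counter (r.map (fun w => [w])))
      (PySem.Dict.counter (h.map (fun w => [w]))).items PySem.Dict.empty hnd
      (fun p _ => PySem.Dict.contains_empty p.1)
  rw [pvCounterAnd, hsum]
  rw [PySem.Dict.items_counter, pvOfListMap _ hinj]
  simp only [List.map_map]
  have hempty : (PySem.Dict.empty : PySem.Dict (List String) Int).values.sum = 0 := rfl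
  rw [hempty, zero_add]
  have hterm : ∀ w : String,
      (if 0 < min ((List.count ([w]) (h.map (fun w => [w]))) : Int)
            ((PySem.Dict.counter (r.map (fun w => [w]))).getD ([w]) 0)
       then min ((List.count ([w]) (h.map (fun w => [w]))) : Int)
            ((PySem.Dict.counter (r.map (fun w => [w]))).getD ([w]) 0)
       else 0)
      = ((min (h.count w) (r.count w) : Nat) : Int) := by
    intro w
    rw [PySem.Dict.getD_counter, List.count_map_of_injective _ _ hinj,
        List.count_map_of_injective _ _ hinj]
    push_cast
    split_ifs with hc
    · rfl
    · omega
  have hmapeq := List.map_congr_left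
    (l := PySem.Set.ofList h)
    (f := ((fun p : List String × Int =>
        if 0 < min p.2 ((PySem.Dict.counter (r.map (fun w => [w]))).getD p.1 0)
        then min p.2 ((PySem.Dict.counter (r.map (fun w => [w]))).getD p.1 0) else 0) ∘
      ((fun k => (k, (List.count k (h.map (fun w => [w])) : Int))) ∘ (fun w => [w]))))
    (g := fun w => ((min (h.count w) (r.count w) : Nat) : Int))
    (fun w _ => hterm w)
  rw [hmapeq, ← List.sum_toFinset _ (PySem.Set.nodup_ofList h)]
  refine Finset.sum_congr ?_ (fun _ _ => rfl)
  ext a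
  simp [PySem.Set.mem_ofList]

-- ===== VERDICT (by name: the statement is the Claim_ definition above) =====
theorem bleu_stats_spec : Claim_equal_bleu_stats := by
  intro h r _
  show bleu_stats h r = bleu_stats_alt h r
  have hrange : PySem.List.pyRange 1 2 = [1] := by decide
  have hgram : ∀ (l : List String),
      (PySem.List.pyRange 0 ((l.length : Int) + 1 - 1)).map
        (fun i => PySem.List.slice l (some i) (some (i + 1)))
      = l.map (fun w => [w]) := by
    intro l
    have h1 : ((l.length : Int) + 1 - 1) = (l.length : Int) := by ring
    rw [h1, PySem.List.pyRange_zero_natCast, List.map_map]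
    rw [← pvGramsEq l]
    refine List.map_congr_left ?_
    intro k hk
    have : PySem.List.slice l (some (k : Int)) (some ((k : Int) + 1)) = (l.drop k).take 1 := by
      have := PySem.List.slice_natCast l k (k + 1)
      simpa [Nat.add_sub_cancel_left] using this
    simpa [Function.comp] using this
  -- B's side: sorted lists are permutations, so the merge count is the intersection card
  have hperm : ∀ (l : List String),
      (↑(PySem.List.sorted l (fun x => x) false) : Multiset String) = (↑l : Multiset String) :=
    fun l => Multiset.coe_eq_coe.mpr (PySem.List.sorted_perm l (fun x => x) false)
  have hB : pvMergeCount (PySem.List.sorted h (fun x => x) false)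
        (PySem.List.sorted r (fun x => x) false)
      = (((↑h : Multiset String) ∩ ↑r).card : Int) := by
    rw [pvMergeCountInter _ _ (PySem.List.sorted_pairwise h (fun x => x))
        (PySem.List.sorted_pairwise r (fun x => x)), hperm h, hperm r]
  have hA := pvASum h r
  simp only [bleu_stats, bleu_stats_alt, hrange, List.foldl_cons, List.foldl_nil]
  rw [hgram h, hgram r, hB]
  have hcard : (∑ w ∈ h.toFinset, ((min (h.count w) (r.count w) : Nat) : Int))
      = (((↑h : Multiset String) ∩ ↑r).card : Int) := by
    rw [← pvSumMinCard h r]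
    push_cast
    rfl
  have hmax : max ((pvCounterAnd (PySem.Dict.counter (h.map (fun w => [w])))
      (PySem.Dict.counter (r.map (fun w => [w])))).values.sum) 0
      = (((↑h : Multiset String) ∩ ↑r).card : Int) := by
    rw [hA, hcard]
    exact max_eq_left (Int.natCast_nonneg _)
  rw [hmax]
  have hmax2 : max ((h.length : Int) + 1 - 1) 0 = (h.length : Int) := by
    have : (0:Int) ≤ (h.length : Int) := Int.natCast_nonneg _
    omega
  rw [hmax2]
  simp
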